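-- pv_equiv track=rewrite | github.com/MaxWolf-01/TruthTabler | src/bool_expressions.py | get_inner_expr_idx
-- ===== SOURCE A (Python) =====
-- def get_inner_expr_idx(expr):
--     """
--     :return: start and end index of inner expression including brackets
--     """
--     open_brackets = 0
--     closed_brackets = 0
--     bracket_idxs = get_bracket_idxs(expr)
--     for i in bracket_idxs:
--         if expr[i] == '(':
--             open_brackets += 1
--         elif expr[i] == ')':
--             closed_brackets += 1
--             if open_brackets == closed_brackets:
--                 inner_expr_start_idx = bracket_idxs[0]
--                 inner_expr_end_idx = bracket_idxs[(open_brackets + closed_brackets) - 1]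
--                 return inner_expr_start_idx, inner_expr_end_idx
--
-- def get_bracket_idxs(expr):
--     return [i for i, x in enumerate(expr) if isinstance(x, str) and x in '()']
-- ===== SOURCE B (Python) =====
-- def get_inner_expr_idx(expr):
--     """
--     :return: start and end index of inner expression including brackets
--     """
--     delta = [(x == '(') - (x == ')') if isinstance(x, str) else 0 for x in expr]
--     sums = []
--     t = 0
--     for d in delta:
--         t += d
--         sums.append(t)
--     end = next((j for j, (d, s) in enumerate(zip(delta, sums)) if d < 0 and s == 0), None)
--     if end is None:
--         return None
--     start = next((i for i, d in enumerate(delta) if d != 0), None)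
--     return start, end
-- ===== Notes on version B (the rewrite author's own statement) =====
-- stated objective: alternative
-- what changed: B drops A's bracket-index list with its two counters and positional re-indexing, and instead maps expr to a numeric +1/-1 delta array, materialises its prefix-sum array, then finds the end as the first position with delta<0 and prefix sum 0 and the start as the first nonzero delta.
-- intended difference: On inputs where an element '' or '()' (accepted by A's substring test x in '()') occurs before the first balance-closing ')', A returns bracket indices shifted onto those non-bracket elements (e.g. (0,1) on ['','(',')']), while B returns the start/end of the first balanced bracket group itself ((1,2) there), which is the intended value. — e.g. on get_inner_expr_idx(["", "(", ")"]): A returns some (0, 1), B returns some (1, 2)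
import Mathlib
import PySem

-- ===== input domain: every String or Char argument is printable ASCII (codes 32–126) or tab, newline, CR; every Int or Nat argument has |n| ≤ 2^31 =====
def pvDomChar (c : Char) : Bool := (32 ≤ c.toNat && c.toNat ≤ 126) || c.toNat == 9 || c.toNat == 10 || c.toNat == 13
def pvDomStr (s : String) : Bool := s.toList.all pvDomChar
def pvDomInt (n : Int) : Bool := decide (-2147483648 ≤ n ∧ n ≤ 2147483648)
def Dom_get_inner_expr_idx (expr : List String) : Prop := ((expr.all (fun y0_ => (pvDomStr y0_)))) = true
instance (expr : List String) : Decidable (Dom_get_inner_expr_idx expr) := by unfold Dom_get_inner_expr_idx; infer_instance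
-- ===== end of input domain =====

-- B replaces A's bracket-index list with its two counters and positional re-indexing by a staged
-- pipeline (numeric +1/-1 delta array, its prefix-sum array, then two independent searches for the
-- end and the start); on the exceptional inputs described at D_ below A's indices are shifted by
-- '' / '()' elements and B returns the intended ones (objective: alternative; no speed claim).

-- ===== PORT A =====
def get_bracket_idxs (expr : List String) : List Int :=
  ((PySem.List.enumerate expr).filter (fun p => PySem.Str.isIn p.2 "()")).map (fun p => p.1)

-- the `for i in bracket_idxs` loop; expr[i] / bracket_idxs[..] are in range wherever read, so pyGetD is exact
def pvALoop (expr : List String) (bracket_idxs : List Int) :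
    List Int → Int → Int → Option (Int × Int)
  | [], _, _ => none
  | i :: rest, open_brackets, closed_brackets =>
    if PySem.List.pyGetD expr i "" = "(" then
      pvALoop expr bracket_idxs rest (open_brackets + 1) closed_brackets
    else if PySem.List.pyGetD expr i "" = ")" then
      if open_brackets = closed_brackets + 1 then
        some (PySem.List.pyGetD bracket_idxs 0 0,
              PySem.List.pyGetD bracket_idxs (open_brackets + (closed_brackets + 1) - 1) 0)
      else pvALoop expr bracket_idxs rest open_brackets (closed_brackets + 1)
    else pvALoop expr bracket_idxs rest open_brackets closed_brackets

def get_inner_expr_idx (expr : List String) : Option (Int × Int) :=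
  pvALoop expr (get_bracket_idxs expr) (get_bracket_idxs expr) 0 0

-- ===== PORT B =====
-- Source B's delta comprehension (isinstance(x, str) is always true on List String; True-False is 1/0/-1)
def pvDelta (expr : List String) : List Int :=
  expr.map (fun x => (if x = "(" then (1:Int) else 0) - (if x = ")" then (1:Int) else 0))

-- Source B's prefix-sum loop (t += d; sums.append(t))
def pvSums : Int → List Int → List Int
  | _, [] => []
  | t, d :: ds => (t + d) :: pvSums (t + d) ds

-- Source B's `next((j for j,(d,s) in enumerate(zip(delta, sums)) if d < 0 and s == 0), None)`
def pvFindEnd : List (Int × Int) → Int → Option Int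
  | [], _ => none
  | (d, s) :: rest, j => if d < 0 ∧ s = 0 then some j else pvFindEnd rest (j + 1)

-- Source B's `next((i for i,d in enumerate(delta) if d != 0), None)`
def pvFindStart : List Int → Int → Option Int
  | [], _ => none
  | d :: rest, i => if d ≠ 0 then some i else pvFindStart rest (i + 1)

def get_inner_expr_idx_alt (expr : List String) : Option (Int × Int) :=
  match pvFindEnd ((pvDelta expr).zip (pvSums 0 (pvDelta expr))) 0 with
  | none => none
  | some e =>
    match pvFindStart (pvDelta expr) 0 with
    | none => none   -- unreachable: a bracket exists whenever `end` was found
    | some s => some (s, e)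

-- ===== PRECONDITION & SPEC =====
-- On inputs whose element '' or '()' (accepted by A's substring test `x in '()'`) occurs before the
-- position of the first balance-closing ')', A returns bracket indices shifted onto those non-bracket
-- elements, while B returns the start/end of the first balanced bracket group itself, which is the
-- intended value.
-- j is A's/B's trigger: a ')' closing the cumulative bracket balance to zero
def pvTrigB (expr : List String) (j : Nat) : Bool :=
  let t := expr.take (j+1)
  t.getLast? == some ")" && t.count "(" == t.count ")"
-- the first element accepted by A's substring test `x in '()'` without being a bracket ('' or '()')
-- occurs before the first trigger (if no trigger exists, find? yields none and getD 0 makes this False)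
def D_get_inner_expr_idx (expr : List String) : Prop :=
  expr.findIdx ["", "()"].contains < ((List.range expr.length).find? (pvTrigB expr)).getD 0
instance (expr : List String) : Decidable (D_get_inner_expr_idx expr) := by
  unfold D_get_inner_expr_idx; infer_instance

def Spec_get_inner_expr_idx (expr : List String) (out : Option (Int × Int)) : Prop :=
  ¬ D_get_inner_expr_idx expr → out = get_inner_expr_idx_alt expr
instance (expr : List String) (out : Option (Int × Int)) : Decidable (Spec_get_inner_expr_idx expr out) := by
  unfold Spec_get_inner_expr_idx; infer_instance

def pvDiffWitness_get_inner_expr_idx : List String := ["", "(", ")"]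
def pvDiffWitnessOut_get_inner_expr_idx : (Option (Int × Int)) × (Option (Int × Int)) :=
  (some (0, 1), some (1, 2))

-- ===== CLAIM (what is proved, stated in full; the proofs are below) =====
def Claim_unchanged_get_inner_expr_idx : Prop := ∀ (expr : List String), Dom_get_inner_expr_idx expr → Spec_get_inner_expr_idx expr (get_inner_expr_idx expr)
def Claim_changed_get_inner_expr_idx : Prop := Dom_get_inner_expr_idx (pvDiffWitness_get_inner_expr_idx) ∧ D_get_inner_expr_idx (pvDiffWitness_get_inner_expr_idx) ∧ get_inner_expr_idx (pvDiffWitness_get_inner_expr_idx) = pvDiffWitnessOut_get_inner_expr_idx.1 ∧ get_inner_expr_idx_alt (pvDiffWitness_get_inner_expr_idx) = pvDiffWitnessOut_get_inner_expr_idx.2 ∧ pvDiffWitnessOut_get_inner_expr_idx.1 ≠ pvDiffWitnessOut_get_inner_expr_idx.2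
def Claim_exact_get_inner_expr_idx : Prop := ∀ (expr : List String), Dom_get_inner_expr_idx expr → D_get_inner_expr_idx expr → get_inner_expr_idx expr ≠ get_inner_expr_idx_alt expr

-- ===== LEMMAS AND PROOFS =====

-- "j is a position where the cumulative bracket balance closes to zero on a ')'" (= A's/B's trigger)
def pvTrig (expr : List String) (j : Nat) : Prop :=
  expr[j]? = some ")" ∧ (expr.take (j+1)).count "(" = (expr.take (j+1)).count ")"

-- index lists: pvBIdx = indices passing A's substring test; pvRIdx = indices of exact brackets
def pvBIdx : List String → Nat → List Int
  | [], _ => []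
  | x :: l, n => if PySem.Str.isIn x "()" then (n : Int) :: pvBIdx l (n + 1) else pvBIdx l (n + 1)

def pvRIdx : List String → Nat → List Nat
  | [], _ => []
  | x :: l, n => if x = "(" ∨ x = ")" then n :: pvRIdx l (n + 1) else pvRIdx l (n + 1)

lemma pvBIdx_gen (l : List String) : ∀ (s : Nat),
    ((PySem.List.enumerate l (s : Int)).filter (fun p => PySem.Str.isIn p.2 "()")).map (fun p => p.1)
      = pvBIdx l s := by
  induction l with
  | nil => intro s; simp [PySem.List.enumerate_nil, pvBIdx]
  | cons x l ih => intro s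
                   have h1 : ((s : Int) + 1) = ((s + 1 : Nat) : Int) := by push_cast; ring
                   simp only [PySem.List.enumerate_cons, List.filter_cons, pvBIdx]
                   by_cases hx : PySem.Str.isIn x "()" = true
                   · simp only [hx, if_true, List.map_cons, h1, ih (s+1)]
                   · simp only [Bool.not_eq_true] at hx
                     simp only [hx, if_false, Bool.false_eq_true, h1, ih (s+1)]

lemma pvBIdx_eq_bracket_idxs (expr : List String) : get_bracket_idxs expr = pvBIdx expr 0 := by
  have := pvBIdx_gen expr 0
  simpa [get_bracket_idxs] using this

lemma pvBIdx_append (p q : List String) : ∀ (n : Nat),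
    pvBIdx (p ++ q) n = pvBIdx p n ++ pvBIdx q (n + p.length) := by
  induction p with
  | nil => intro n; simp [pvBIdx]
  | cons x p ih => intro n
                   simp only [List.cons_append, pvBIdx]
                   split <;> simp [ih (n+1)] <;> ring_nf

lemma pvRIdx_append (p q : List String) : ∀ (n : Nat),
    pvRIdx (p ++ q) n = pvRIdx p n ++ pvRIdx q (n + p.length) := by
  induction p with
  | nil => intro n; simp [pvRIdx]
  | cons x p ih => intro n
                   simp only [List.cons_append, pvRIdx]
                   split <;> simp [ih (n+1)] <;> ring_nf

lemma pvRIdx_length (p : List String) : ∀ (k : Nat),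
    (pvRIdx p k).length = p.count "(" + p.count ")" := by
  induction p with
  | nil => intro k; simp [pvRIdx]
  | cons x p ih => intro k
                   by_cases h1 : x = "("
                   · simp [pvRIdx, h1, ih]; omega
                   · by_cases h2 : x = ")"
                     · simp [pvRIdx, h2, ih]; omega
                     · simp [pvRIdx, h1, h2, ih]

lemma pvInfix_pair {α : Type} {sub : List α} {a b : α} (h : sub <:+: [a, b]) :
    sub = [] ∨ sub = [a] ∨ sub = [b] ∨ sub = [a, b] := by
  obtain ⟨s, t, hst⟩ := h
  match s, sub, t, hst with
  | [], [], _, _ => left; rfl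
  | [], [u], t, h => simp at h; rw [h.1]; right; left; rfl
  | [], [u, v], t, h =>
      simp at h
      right; right; right; rw [h.1, h.2.1]
  | [], u :: v :: w :: t, _, h => simp at h
  | [c], [], _, _ => left; rfl
  | [c], [u], t, h =>
      simp at h
      right; right; left; rw [h.2.1]
  | [c], u :: v :: t, _, h => simp at h
  | [c, d], sub, t, h =>
      simp at h
      left; exact h.2.2.1
  | c :: d :: e :: s, sub, t, h => simp at h

lemma pvIsIn_cases {x : String} (h : PySem.Str.isIn x "()" = true) :
    x = "" ∨ x = "(" ∨ x = ")" ∨ x = "()" := by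
  have h2 : x.toList <:+: ['(', ')'] := by
    have := (PySem.Str.isIn_iff_infix x "()").1 h
    simpa using this
  rcases pvInfix_pair h2 with h3 | h3 | h3 | h3
  · left; apply String.toList_inj.mp; rw [h3]; rfl
  · right; left; apply String.toList_inj.mp; rw [h3]; rfl
  · right; right; left; apply String.toList_inj.mp; rw [h3]; rfl
  · right; right; right; apply String.toList_inj.mp; rw [h3]; rfl

lemma pvIsIn_of_real {x : String} (h : x = "(" ∨ x = ")") : PySem.Str.isIn x "()" = true := by
  rcases h with h | h <;> subst h <;> decide

lemma pvBIdx_of_nofake (p : List String) : ∀ (k : Nat),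
    (∀ x ∈ p, ¬ (x = "" ∨ x = "()")) →
    pvBIdx p k = (pvRIdx p k).map (fun m => Int.ofNat m) := by
  induction p with
  | nil => intro k _; simp [pvBIdx, pvRIdx]
  | cons x p ih =>
      intro k hf
      have hfx := hf x (by simp)
      have hfp : ∀ y ∈ p, ¬ (y = "" ∨ y = "()") := fun y hy => hf y (by simp [hy])
      by_cases hx : PySem.Str.isIn x "()" = true
      · have hreal : x = "(" ∨ x = ")" := by
          rcases pvIsIn_cases hx with h | h | h | h
          · exact absurd (Or.inl h) hfx
          · exact Or.inl h
          · exact Or.inr h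
          · exact absurd (Or.inr h) hfx
        rw [pvBIdx, if_pos hx, pvRIdx, if_pos hreal, List.map_cons, ih (k+1) hfp]; rfl
      · have hnr : ¬ (x = "(" ∨ x = ")") := fun hr => hx (pvIsIn_of_real hr)
        rw [pvBIdx, if_neg hx, pvRIdx, if_neg hnr, ih (k+1) hfp]

lemma pvTrigB_iff (expr : List String) (j : Nat) (hj : j < expr.length) :
    pvTrigB expr j = true ↔ pvTrig expr j := by
  have hlen : (expr.take (j+1)).length = j + 1 := by simp; omega
  have hlast : (expr.take (j+1)).getLast? = expr[j]? := by
    rw [List.getLast?_eq_getElem?, hlen]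
    simp
  simp [pvTrigB, pvTrig, hlast]

lemma pvFindIdx_le {α : Type} {l : List α} {p : α → Bool} {i : Nat}
    (h : i < l.length) (hp : p l[i] = true) : l.findIdx p ≤ i := by
  by_contra hlt
  have hlt' : i < l.findIdx p := Nat.not_le.1 hlt
  have := List.not_of_lt_findIdx hlt'
  simpa using hp.symm.trans this

lemma pvFind?_range_props {p : Nat → Bool} {j : Nat} : ∀ {len : Nat},
    (List.range len).find? p = some j → j < len ∧ p j = true ∧ ∀ k, k < j → p k = false := by
  intro len
  induction len with
  | zero => intro h; simp [List.range_zero] at h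
  | succ m ih =>
      intro h
      rw [List.range_succ, List.find?_append] at h
      cases hf : (List.range m).find? p with
      | some j' =>
          rw [hf] at h
          simp at h
          subst h
          obtain ⟨h1, h2, h3⟩ := ih hf
          exact ⟨by omega, h2, h3⟩
      | none =>
          rw [hf] at h
          simp at h
          rcases h with ⟨hp, hj⟩
          have hall := List.find?_eq_none.1 hf
          constructor
          · omega
          · refine ⟨hj ▸ hp, ?_⟩
            intro k hk
            have : k < m := by omega
            have := hall k (List.mem_range.2 this)
            simpa using this

lemma pvBIdx_mem_lt (p : List String) : ∀ (k : Nat) (z : Int), z ∈ pvBIdx p k → z < (k : Int) + p.length := by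
  induction p with
  | nil => intro k z hz; simp [pvBIdx] at hz
  | cons x p ih =>
      intro k z hz
      rw [pvBIdx] at hz
      split at hz
      · rcases List.mem_cons.1 hz with h | h
        · subst h; simp only [List.length_cons]; push_cast; omega
        · have := ih (k+1) z h
          simp only [List.length_cons]; push_cast at this ⊢; omega
      · have := ih (k+1) z hz
        simp only [List.length_cons]; push_cast at this ⊢; omega

lemma pvBIdx_len_ge0 (p : List String) : ∀ (k : Nat),
    p.count "(" + p.count ")" ≤ (pvBIdx p k).length := by
  induction p with
  | nil => intro k; simp [pvBIdx]
  | cons x p ih =>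
      intro k
      rw [pvBIdx]
      by_cases hr : x = "(" ∨ x = ")"
      · rw [if_pos (pvIsIn_of_real hr)]
        have := ih (k+1)
        rcases hr with h | h <;> subst h <;> simp <;> omega
      · have h1 : ¬ x = "(" := fun hc => hr (Or.inl hc)
        have h2 : ¬ x = ")" := fun hc => hr (Or.inr hc)
        have := ih (k+1)
        split <;> simp [h1, h2] <;> omega

lemma pvBIdx_len_ge1 (p : List String) (y : String) (hy : y ∈ p) (hfake : y = "" ∨ y = "()") :
    ∀ (k : Nat), p.count "(" + p.count ")" + 1 ≤ (pvBIdx p k).length := by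
  induction p with
  | nil => simp at hy
  | cons x p ih =>
      intro k
      have hyin : PySem.Str.isIn y "()" = true := by
        rcases hfake with h | h <;> subst h <;> decide
      have hyno : ¬ (y = "(" ∨ y = ")") := by
        rcases hfake with h | h <;> subst h <;> decide
      rcases List.mem_cons.1 hy with h | h
      · subst h
        rw [pvBIdx, if_pos hyin]
        have h1 : ¬ y = "(" := fun hc => hyno (Or.inl hc)
        have h2 : ¬ y = ")" := fun hc => hyno (Or.inr hc)
        have := pvBIdx_len_ge0 p (k+1)
        simp [h1, h2]
        omega
      · rw [pvBIdx]
        have := ih h (k+1)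
        by_cases hr : x = "(" ∨ x = ")"
        · rw [if_pos (pvIsIn_of_real hr)]
          rcases hr with hx | hx <;> subst hx <;> simp <;> omega
        · have h1 : ¬ x = "(" := fun hc => hr (Or.inl hc)
          have h2 : ¬ x = ")" := fun hc => hr (Or.inr hc)
          split <;> simp [h1, h2] <;> omega

lemma pvARun (expr : List String) (j0 : Nat) (htr : pvTrig expr j0) (hj0 : j0 < expr.length)
    (hfirst : ∀ k, k < j0 → ¬ pvTrig expr k) :
    ∀ (l : List String) (n : Nat), l = expr.drop n → n ≤ j0 →
    pvALoop expr (pvBIdx expr 0) (pvBIdx l n)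
        ((expr.take n).count "(" : Int) ((expr.take n).count ")" : Int)
      = some (PySem.List.pyGetD (pvBIdx expr 0) 0 0,
          PySem.List.pyGetD (pvBIdx expr 0)
            (((expr.take (j0+1)).count "(" : Int) + ((expr.take (j0+1)).count ")" : Int) - 1) 0) := by
  intro l
  induction l with
  | nil =>
      intro n hl hn
      have : expr.length ≤ n := by
        have := congrArg List.length hl
        simp at this; omega
      omega
  | cons x l' ih =>
    intro n hl hn
    have hx : expr[n]? = some x := by
      have h0 : (expr.drop n)[0]? = some x := by rw [← hl]; rfl
      rw [List.getElem?_drop] at h0; simpa using h0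
    have hnlen : n < expr.length := by
      rcases List.getElem?_eq_some_iff.1 hx with ⟨h, _⟩; exact h
    have hdrop : l' = expr.drop (n + 1) := by
      have h1 : (expr.drop n).drop 1 = expr.drop (n + 1) := by rw [List.drop_drop]
      rw [← hl] at h1; simpa using h1
    have htake : expr.take (n + 1) = expr.take n ++ [x] := by
      rw [List.take_add_one, hx]; rfl
    have hgd : PySem.List.pyGetD expr (n : Int) "" = x := by
      rw [PySem.List.pyGetD_natCast, List.getD_eq_getElem?_getD, hx]; rfl
    by_cases hstop : n = j0
    · subst hstop
      have hxcl : x = ")" := Option.some.inj (hx.symm.trans htr.1)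
      subst hxcl
      have hisin : PySem.Str.isIn ")" "()" = true := by decide
      have hgne : ¬ PySem.List.pyGetD expr (n : Int) "" = "(" := by rw [hgd]; decide
      have hcO : (expr.take (n+1)).count "(" = (expr.take n).count "(" := by
        rw [htake]; simp [List.count_append]
      have hcC : (expr.take (n+1)).count ")" = (expr.take n).count ")" + 1 := by
        rw [htake]; simp
      have hoc : ((expr.take n).count "(" : Int) = ((expr.take n).count ")" : Int) + 1 := by
        have := htr.2
        rw [hcO, hcC] at this
        omega
      rw [pvBIdx, if_pos hisin, pvALoop, if_neg hgne, if_pos hgd, if_pos hoc]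
      congr 2
      rw [hcO, hcC]
      push_cast
      ring
    · have hnj : n < j0 := by omega
      by_cases hop : x = "("
      · subst hop
        have hisin : PySem.Str.isIn "(" "()" = true := by decide
        have hcO : (expr.take (n+1)).count "(" = (expr.take n).count "(" + 1 := by
          rw [htake]; simp
        have hcC : (expr.take (n+1)).count ")" = (expr.take n).count ")" := by
          rw [htake]; simp [List.count_append]
        rw [pvBIdx, if_pos hisin, pvALoop, if_pos hgd]
        have hth := ih (n+1) hdrop (by omega)
        rw [hcO, hcC] at hth
        push_cast at hth ⊢
        exact hth
      · by_cases hcl : x = ")"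
        · subst hcl
          have hisin : PySem.Str.isIn ")" "()" = true := by decide
          have hgne : ¬ PySem.List.pyGetD expr (n : Int) "" = "(" := by rw [hgd]; decide
          have hcO : (expr.take (n+1)).count "(" = (expr.take n).count "(" := by
            rw [htake]; simp [List.count_append]
          have hcC : (expr.take (n+1)).count ")" = (expr.take n).count ")" + 1 := by
            rw [htake]; simp
          have hoc : ¬ ((expr.take n).count "(" : Int) = ((expr.take n).count ")" : Int) + 1 := by
            intro hc
            apply hfirst n hnj
            exact ⟨hx, by rw [hcO, hcC]; omega⟩
          rw [pvBIdx, if_pos hisin, pvALoop, if_neg hgne, if_pos hgd, if_neg hoc]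
          have hth := ih (n+1) hdrop (by omega)
          rw [hcO, hcC] at hth
          push_cast at hth ⊢
          exact hth
        · have hcO : (expr.take (n+1)).count "(" = (expr.take n).count "(" := by
            rw [htake]; simp [List.count_append, List.count_singleton]
            intro hc; exact hop hc
          have hcC : (expr.take (n+1)).count ")" = (expr.take n).count ")" := by
            rw [htake]; simp [List.count_append, List.count_singleton]
            intro hc; exact hcl hc
          have hgno : ¬ PySem.List.pyGetD expr (n : Int) "" = "(" := by rw [hgd]; exact hop
          have hgnc : ¬ PySem.List.pyGetD expr (n : Int) "" = ")" := by rw [hgd]; exact hcl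
          have hth := ih (n+1) hdrop (by omega)
          rw [hcO, hcC] at hth
          by_cases hisin : PySem.Str.isIn x "()" = true
          · rw [pvBIdx, if_pos hisin, pvALoop, if_neg hgno, if_neg hgnc]
            exact hth
          · rw [pvBIdx, if_neg hisin]
            exact hth

lemma pvANone (expr : List String) (hnt : ∀ k, ¬ pvTrig expr k) :
    ∀ (l : List String) (n : Nat), l = expr.drop n →
    pvALoop expr (pvBIdx expr 0) (pvBIdx l n)
        ((expr.take n).count "(" : Int) ((expr.take n).count ")" : Int) = none := by
  intro l
  induction l with
  | nil => intro n _; simp [pvBIdx, pvALoop]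
  | cons x l' ih =>
    intro n hl
    have hx : expr[n]? = some x := by
      have h0 : (expr.drop n)[0]? = some x := by rw [← hl]; rfl
      rw [List.getElem?_drop] at h0; simpa using h0
    have hdrop : l' = expr.drop (n + 1) := by
      have h1 : (expr.drop n).drop 1 = expr.drop (n + 1) := by rw [List.drop_drop]
      rw [← hl] at h1; simpa using h1
    have htake : expr.take (n + 1) = expr.take n ++ [x] := by
      rw [List.take_add_one, hx]; rfl
    have hgd : PySem.List.pyGetD expr (n : Int) "" = x := by
      rw [PySem.List.pyGetD_natCast, List.getD_eq_getElem?_getD, hx]; rfl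
    by_cases hop : x = "("
    · subst hop
      have hisin : PySem.Str.isIn "(" "()" = true := by decide
      have hcO : (expr.take (n+1)).count "(" = (expr.take n).count "(" + 1 := by
        rw [htake]; simp
      have hcC : (expr.take (n+1)).count ")" = (expr.take n).count ")" := by
        rw [htake]; simp [List.count_append]
      rw [pvBIdx, if_pos hisin, pvALoop, if_pos hgd]
      have hth := ih (n+1) hdrop
      rw [hcO, hcC] at hth
      push_cast at hth ⊢
      exact hth
    · by_cases hcl : x = ")"
      · subst hcl
        have hisin : PySem.Str.isIn ")" "()" = true := by decide
        have hgne : ¬ PySem.List.pyGetD expr (n : Int) "" = "(" := by rw [hgd]; decide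
        have hcO : (expr.take (n+1)).count "(" = (expr.take n).count "(" := by
          rw [htake]; simp [List.count_append]
        have hcC : (expr.take (n+1)).count ")" = (expr.take n).count ")" + 1 := by
          rw [htake]; simp
        have hoc : ¬ ((expr.take n).count "(" : Int) = ((expr.take n).count ")" : Int) + 1 := by
          intro hc
          exact hnt n ⟨hx, by rw [hcO, hcC]; omega⟩
        rw [pvBIdx, if_pos hisin, pvALoop, if_neg hgne, if_pos hgd, if_neg hoc]
        have hth := ih (n+1) hdrop
        rw [hcO, hcC] at hth
        push_cast at hth ⊢
        exact hth
      · have hcO : (expr.take (n+1)).count "(" = (expr.take n).count "(" := by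
          rw [htake]; simp [List.count_append, List.count_singleton]
          intro hc; exact hop hc
        have hcC : (expr.take (n+1)).count ")" = (expr.take n).count ")" := by
          rw [htake]; simp [List.count_append, List.count_singleton]
          intro hc; exact hcl hc
        have hgno : ¬ PySem.List.pyGetD expr (n : Int) "" = "(" := by rw [hgd]; exact hop
        have hgnc : ¬ PySem.List.pyGetD expr (n : Int) "" = ")" := by rw [hgd]; exact hcl
        have hth := ih (n+1) hdrop
        rw [hcO, hcC] at hth
        by_cases hisin : PySem.Str.isIn x "()" = true
        · rw [pvBIdx, if_pos hisin, pvALoop, if_neg hgno, if_neg hgnc]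
          exact hth
        · rw [pvBIdx, if_neg hisin]
          exact hth

lemma pvNe1 : ¬ ("(" : String) = ")" := by decide
lemma pvNe2 : ¬ (")" : String) = "(" := by decide

lemma pvEndNone (expr : List String) (hnt : ∀ k, ¬ pvTrig expr k) :
    ∀ (l : List String) (n : Nat) (t : Int), l = expr.drop n →
    t = ((expr.take n).count "(" : Int) - ((expr.take n).count ")" : Int) →
    pvFindEnd ((pvDelta l).zip (pvSums t (pvDelta l))) (n : Int) = none := by
  intro l
  induction l with
  | nil => intro n t _ _; simp [pvDelta, pvFindEnd]
  | cons x l' ih =>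
    intro n t hl ht
    have hx : expr[n]? = some x := by
      have h0 : (expr.drop n)[0]? = some x := by rw [← hl]; rfl
      rw [List.getElem?_drop] at h0; simpa using h0
    have hdrop : l' = expr.drop (n + 1) := by
      have h1 : (expr.drop n).drop 1 = expr.drop (n + 1) := by rw [List.drop_drop]
      rw [← hl] at h1; simpa using h1
    have htake : expr.take (n + 1) = expr.take n ++ [x] := by
      rw [List.take_add_one, hx]; rfl
    have hcast : ((n : Int) + 1) = ((n + 1 : Nat) : Int) := by push_cast; ring
    by_cases hop : x = "("
    · subst hop
      have hd : pvDelta ("(" :: l') = (1 : Int) :: pvDelta l' := by norm_num [pvDelta, pvNe1, pvNe2]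
      have hcO : (expr.take (n+1)).count "(" = (expr.take n).count "(" + 1 := by
        rw [htake]; simp
      have hcC : (expr.take (n+1)).count ")" = (expr.take n).count ")" := by
        rw [htake]; simp [List.count_append]
      rw [hd, pvSums, List.zip_cons_cons, pvFindEnd, if_neg (by rintro ⟨h, -⟩; omega), hcast]
      exact ih (n+1) (t+1) hdrop (by rw [hcO, hcC]; push_cast; omega)
    · by_cases hcl : x = ")"
      · subst hcl
        have hd : pvDelta (")" :: l') = (-1 : Int) :: pvDelta l' := by norm_num [pvDelta, pvNe1, pvNe2]
        have hcO : (expr.take (n+1)).count "(" = (expr.take n).count "(" := by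
          rw [htake]; simp [List.count_append]
        have hcC : (expr.take (n+1)).count ")" = (expr.take n).count ")" + 1 := by
          rw [htake]; simp
        rw [hd, pvSums, List.zip_cons_cons, pvFindEnd,
            if_neg (by
              rintro ⟨-, hs⟩
              exact hnt n ⟨hx, by rw [hcO, hcC]; omega⟩),
            hcast]
        exact ih (n+1) (t + -1) hdrop (by rw [hcO, hcC]; push_cast; omega)
      · have hd : pvDelta (x :: l') = (0 : Int) :: pvDelta l' := by simp [pvDelta, hop, hcl]
        have hcO : (expr.take (n+1)).count "(" = (expr.take n).count "(" := by
          rw [htake]; simp [List.count_append, List.count_singleton]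
          intro hc; exact hop hc
        have hcC : (expr.take (n+1)).count ")" = (expr.take n).count ")" := by
          rw [htake]; simp [List.count_append, List.count_singleton]
          intro hc; exact hcl hc
        rw [hd, pvSums, List.zip_cons_cons, pvFindEnd, if_neg (by rintro ⟨h, -⟩; omega), hcast]
        exact ih (n+1) (t + 0) hdrop (by rw [hcO, hcC]; omega)

lemma pvEndSome (expr : List String) (j0 : Nat) (htr : pvTrig expr j0)
    (hfirst : ∀ k, k < j0 → ¬ pvTrig expr k) :
    ∀ (l : List String) (n : Nat) (t : Int), l = expr.drop n → n ≤ j0 →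
    t = ((expr.take n).count "(" : Int) - ((expr.take n).count ")" : Int) →
    pvFindEnd ((pvDelta l).zip (pvSums t (pvDelta l))) (n : Int) = some (j0 : Int) := by
  intro l
  induction l with
  | nil =>
      intro n t hl hn _
      have h1 : expr.length ≤ n := by
        have := congrArg List.length hl
        simp at this; omega
      have hj : j0 < expr.length := by
        rcases List.getElem?_eq_some_iff.1 htr.1 with ⟨h, _⟩; exact h
      omega
  | cons x l' ih =>
    intro n t hl hn ht
    have hx : expr[n]? = some x := by
      have h0 : (expr.drop n)[0]? = some x := by rw [← hl]; rfl
      rw [List.getElem?_drop] at h0; simpa using h0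
    have hdrop : l' = expr.drop (n + 1) := by
      have h1 : (expr.drop n).drop 1 = expr.drop (n + 1) := by rw [List.drop_drop]
      rw [← hl] at h1; simpa using h1
    have htake : expr.take (n + 1) = expr.take n ++ [x] := by
      rw [List.take_add_one, hx]; rfl
    have hcast : ((n : Int) + 1) = ((n + 1 : Nat) : Int) := by push_cast; ring
    by_cases hstop : n = j0
    · subst hstop
      have hxcl : x = ")" := Option.some.inj (hx.symm.trans htr.1)
      subst hxcl
      have hd : pvDelta (")" :: l') = (-1 : Int) :: pvDelta l' := by norm_num [pvDelta, pvNe1, pvNe2]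
      have hcO : (expr.take (n+1)).count "(" = (expr.take n).count "(" := by
        rw [htake]; simp [List.count_append]
      have hcC : (expr.take (n+1)).count ")" = (expr.take n).count ")" + 1 := by
        rw [htake]; simp
      have hoc : t = 1 := by
        have := htr.2
        rw [hcO, hcC] at this
        omega
      rw [hd, pvSums, List.zip_cons_cons, pvFindEnd, if_pos ⟨by omega, by omega⟩]
    · have hnj : n < j0 := by omega
      by_cases hop : x = "("
      · subst hop
        have hd : pvDelta ("(" :: l') = (1 : Int) :: pvDelta l' := by norm_num [pvDelta, pvNe1, pvNe2]
        have hcO : (expr.take (n+1)).count "(" = (expr.take n).count "(" + 1 := by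
          rw [htake]; simp
        have hcC : (expr.take (n+1)).count ")" = (expr.take n).count ")" := by
          rw [htake]; simp [List.count_append]
        rw [hd, pvSums, List.zip_cons_cons, pvFindEnd, if_neg (by rintro ⟨h, -⟩; omega), hcast]
        exact ih (n+1) (t+1) hdrop (by omega) (by rw [hcO, hcC]; push_cast; omega)
      · by_cases hcl : x = ")"
        · subst hcl
          have hd : pvDelta (")" :: l') = (-1 : Int) :: pvDelta l' := by norm_num [pvDelta, pvNe1, pvNe2]
          have hcO : (expr.take (n+1)).count "(" = (expr.take n).count "(" := by
            rw [htake]; simp [List.count_append]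
          have hcC : (expr.take (n+1)).count ")" = (expr.take n).count ")" + 1 := by
            rw [htake]; simp
          rw [hd, pvSums, List.zip_cons_cons, pvFindEnd,
              if_neg (by
                rintro ⟨-, hs⟩
                exact hfirst n hnj ⟨hx, by rw [hcO, hcC]; omega⟩),
              hcast]
          exact ih (n+1) (t + -1) hdrop (by omega) (by rw [hcO, hcC]; push_cast; omega)
        · have hd : pvDelta (x :: l') = (0 : Int) :: pvDelta l' := by simp [pvDelta, hop, hcl]
          have hcO : (expr.take (n+1)).count "(" = (expr.take n).count "(" := by
            rw [htake]; simp [List.count_append, List.count_singleton]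
            intro hc; exact hop hc
          have hcC : (expr.take (n+1)).count ")" = (expr.take n).count ")" := by
            rw [htake]; simp [List.count_append, List.count_singleton]
            intro hc; exact hcl hc
          rw [hd, pvSums, List.zip_cons_cons, pvFindEnd, if_neg (by rintro ⟨h, -⟩; omega), hcast]
          exact ih (n+1) (t + 0) hdrop (by omega) (by rw [hcO, hcC]; omega)

lemma pvStartRun : ∀ (l : List String) (n : Nat),
    pvFindStart (pvDelta l) (n : Int) = ((pvRIdx l n).head?).map (fun m => Int.ofNat m) := by
  intro l
  induction l with
  | nil => intro n; simp [pvDelta, pvFindStart, pvRIdx]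
  | cons x l' ih =>
    intro n
    have hcast : ((n : Int) + 1) = ((n + 1 : Nat) : Int) := by push_cast; ring
    by_cases hr : x = "(" ∨ x = ")"
    · have hd : ∃ c : Int, c ≠ 0 ∧ pvDelta (x :: l') = c :: pvDelta l' := by
        rcases hr with h | h <;> subst h
        · exact ⟨1, by norm_num, by norm_num [pvDelta, pvNe1, pvNe2]⟩
        · exact ⟨-1, by norm_num, by norm_num [pvDelta, pvNe1, pvNe2]⟩
      obtain ⟨c, hc0, hd⟩ := hd
      rw [hd, pvFindStart, if_pos hc0, pvRIdx, if_pos hr]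
      rfl
    · have h1 : ¬ x = "(" := fun hc => hr (Or.inl hc)
      have h2 : ¬ x = ")" := fun hc => hr (Or.inr hc)
      have hd : pvDelta (x :: l') = (0 : Int) :: pvDelta l' := by simp [pvDelta, h1, h2]
      rw [hd, pvFindStart, if_neg (by simp), pvRIdx, if_neg hr, hcast]
      exact ih (n+1)

-- no trigger means no pvTrig at any k (positions ≥ length are impossible automatically)
lemma pvNoTrig (expr : List String)
    (hfind : (List.range expr.length).find? (pvTrigB expr) = none) :
    ∀ k, ¬ pvTrig expr k := by
  intro k hc
  have hk : k < expr.length := by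
    rcases List.getElem?_eq_some_iff.1 hc.1 with ⟨h, _⟩; exact h
  have := List.find?_eq_none.1 hfind k (List.mem_range.2 hk)
  rw [(pvTrigB_iff expr k hk).2 hc] at this
  simp at this

-- ===== VERDICT (by name: the statement is the Claim_ definition above) =====
theorem get_inner_expr_idx_spec : Claim_unchanged_get_inner_expr_idx := by
  intro expr _hdom
  unfold Spec_get_inner_expr_idx
  intro hD
  cases hfind : (List.range expr.length).find? (pvTrigB expr) with
  | none =>
      have hnt := pvNoTrig expr hfind
      have hA := pvANone expr hnt expr 0 rfl
      simp only [List.take_zero, List.count_nil, Nat.cast_zero] at hA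
      have hB := pvEndNone expr hnt expr 0 0 rfl (by simp)
      simp only [Nat.cast_zero] at hB
      unfold get_inner_expr_idx get_inner_expr_idx_alt
      rw [pvBIdx_eq_bracket_idxs, hA, hB]
  | some j0 =>
      obtain ⟨hj0, htrb, hfirstb⟩ := pvFind?_range_props hfind
      have htr : pvTrig expr j0 := (pvTrigB_iff expr j0 hj0).1 htrb
      have hfirst : ∀ k, k < j0 → ¬ pvTrig expr k := by
        intro k hk hc
        have hf := hfirstb k hk
        rw [(pvTrigB_iff expr k (by omega)).2 hc] at hf
        simp at hf
      -- ¬ D_ means the first '' / '()' element comes at or after j0; as expr[j0] = ")", none is ≤ j0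
      have hnofake : ∀ y ∈ expr.take (j0+1), ¬ (y = "" ∨ y = "()") := by
        intro y hy hc
        unfold D_get_inner_expr_idx at hD
        rw [hfind, Option.getD_some] at hD
        rcases List.mem_iff_getElem.1 hy with ⟨i, hilt, hie⟩
        have hilen : (expr.take (j0+1)).length ≤ j0 + 1 := by simp
        have hi : i ≤ j0 := by omega
        have hiex : i < expr.length := by omega
        have hval : expr[i] = y := by
          rw [← hie]; simp
        have hpe : (["", "()"] : List String).contains expr[i] = true := by
          rcases hc with hc | hc <;> simp [hval, hc]
        have hle := pvFindIdx_le (l := expr) (p := (["", "()"] : List String).contains)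
          (i := i) hiex hpe
        have hij : i = j0 := by omega
        subst hij
        have hxj : expr[i] = ")" := by
          have := htr.1
          rw [List.getElem?_eq_some_iff] at this
          exact this.2
        rw [hxj] at hval
        rcases hc with hc | hc <;> rw [← hval] at hc <;> simp at hc
      -- decompositions around position j0
      have hxj : expr[j0] = ")" := by
        have := htr.1
        rw [List.getElem?_eq_some_iff] at this
        exact this.2
      have hlt : (expr.take j0).length = j0 := by simp; omega
      have htakej : expr.take (j0+1) = expr.take j0 ++ [")"] := by
        rw [List.take_add_one, htr.1]; rfl
      have hPR : pvRIdx (expr.take (j0+1)) 0 = pvRIdx (expr.take j0) 0 ++ [j0] := by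
        rw [htakej, pvRIdx_append]
        simp [pvRIdx, hlt]
      have hltj : (expr.take (j0+1)).length = j0 + 1 := by simp; omega
      have hRfull : pvRIdx expr 0 = (pvRIdx (expr.take j0) 0 ++ [j0]) ++ pvRIdx (expr.drop (j0+1)) (j0+1) := by
        conv_lhs => rw [← List.take_append_drop (j0+1) expr]
        rw [pvRIdx_append, hPR, hltj]
        norm_num
      have hBfull : pvBIdx expr 0 =
          ((pvRIdx (expr.take j0) 0 ++ [j0]).map (fun m => Int.ofNat m))
            ++ pvBIdx (expr.drop (j0+1)) (j0+1) := by
        conv_lhs => rw [← List.take_append_drop (j0+1) expr]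
        rw [pvBIdx_append, pvBIdx_of_nofake _ _ hnofake, hPR, hltj]
        norm_num
      -- B's value
      have hE := pvEndSome expr j0 htr hfirst expr 0 0 rfl (by omega) (by simp)
      simp only [Nat.cast_zero] at hE
      have hS0 := pvStartRun expr 0
      simp only [Nat.cast_zero] at hS0
      have hh : (pvRIdx expr 0).head? = some ((pvRIdx (expr.take j0) 0).headD j0) := by
        rw [hRfull]
        cases pvRIdx (expr.take j0) 0 <;> simp [List.headD]
      have hS : pvFindStart (pvDelta expr) 0
          = some (Int.ofNat ((pvRIdx (expr.take j0) 0).headD j0)) := by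
        rw [hS0, hh]; rfl
      have hBval : get_inner_expr_idx_alt expr
          = some (Int.ofNat ((pvRIdx (expr.take j0) 0).headD j0), (j0 : Int)) := by
        unfold get_inner_expr_idx_alt
        rw [hE, hS]
      -- A's value
      have hA := pvARun expr j0 htr hj0 hfirst expr 0 rfl (by omega)
      simp only [List.take_zero, List.count_nil, Nat.cast_zero] at hA
      have hA1 : PySem.List.pyGetD (pvBIdx expr 0) 0 0
          = Int.ofNat ((pvRIdx (expr.take j0) 0).headD j0) := by
        rw [hBfull, PySem.List.pyGetD_zero]
        cases pvRIdx (expr.take j0) 0 <;> simp [List.headD]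
      have hlenR : (pvRIdx (expr.take (j0+1)) 0).length
          = (expr.take (j0+1)).count "(" + (expr.take (j0+1)).count ")" := pvRIdx_length _ 0
      have hlen2 : (pvRIdx (expr.take j0) 0).length + 1
          = (expr.take (j0+1)).count "(" + (expr.take (j0+1)).count ")" := by
        rw [← hlenR, hPR]; simp
      have hidx : ((expr.take (j0+1)).count "(" : Int) + ((expr.take (j0+1)).count ")" : Int) - 1
          = (((pvRIdx (expr.take j0) 0).length : Nat) : Int) := by
        omega
      have hA2 : PySem.List.pyGetD (pvBIdx expr 0)
          (((expr.take (j0+1)).count "(" : Int) + ((expr.take (j0+1)).count ")" : Int) - 1) 0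
          = (j0 : Int) := by
        rw [hidx, PySem.List.pyGetD_natCast, hBfull, List.getD_eq_getElem?_getD,
            List.getElem?_append_left (by simp),
            List.getElem?_eq_getElem (by simp)]
        simp
      unfold get_inner_expr_idx
      rw [pvBIdx_eq_bracket_idxs, hA, hA1, hA2, hBval]

theorem get_inner_expr_idx_changed : Claim_changed_get_inner_expr_idx := by
  unfold Claim_changed_get_inner_expr_idx; decide

theorem get_inner_expr_idx_tight : Claim_exact_get_inner_expr_idx := by
  intro expr _hdom hd
  unfold D_get_inner_expr_idx at hd
  cases hfind : (List.range expr.length).find? (pvTrigB expr) with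
  | none => rw [hfind] at hd; simp at hd
  | some j0 =>
      rw [hfind] at hd
      simp only [Option.getD_some] at hd
      obtain ⟨hj0, htrb, hfirstb⟩ := pvFind?_range_props hfind
      have htr : pvTrig expr j0 := (pvTrigB_iff expr j0 hj0).1 htrb
      have hfirst : ∀ k, k < j0 → ¬ pvTrig expr k := by
        intro k hk hc
        have hf := hfirstb k hk
        rw [(pvTrigB_iff expr k (by omega)).2 hc] at hf
        simp at hf
      -- the fake element before the first trigger
      set i := expr.findIdx (["", "()"] : List String).contains with hi
      have hilen : i < expr.length := by omega
      have hpi : (["", "()"] : List String).contains expr[i] = true := List.findIdx_getElem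
      have hyfake : expr[i] = "" ∨ expr[i] = "()" := by
        simpa using hpi
      have hymem : expr[i] ∈ expr.take j0 := by
        have : (expr.take j0)[i]'(by simp; omega) = expr[i] := by simp
        rw [← this]
        exact List.getElem_mem _
      -- B's output has second component j0
      have hxj : expr[j0] = ")" := by
        have := htr.1
        rw [List.getElem?_eq_some_iff] at this
        exact this.2
      have hlt : (expr.take j0).length = j0 := by simp; omega
      have htakej : expr.take (j0+1) = expr.take j0 ++ [")"] := by
        rw [List.take_add_one, htr.1]; rfl
      have hPR : pvRIdx (expr.take (j0+1)) 0 = pvRIdx (expr.take j0) 0 ++ [j0] := by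
        rw [htakej, pvRIdx_append]
        simp [pvRIdx, hlt]
      have hltj : (expr.take (j0+1)).length = j0 + 1 := by simp; omega
      have hRfull : pvRIdx expr 0 = (pvRIdx (expr.take j0) 0 ++ [j0]) ++ pvRIdx (expr.drop (j0+1)) (j0+1) := by
        conv_lhs => rw [← List.take_append_drop (j0+1) expr]
        rw [pvRIdx_append, hPR, hltj]
        norm_num
      have hE := pvEndSome expr j0 htr hfirst expr 0 0 rfl (by omega) (by simp)
      simp only [Nat.cast_zero] at hE
      have hS0 := pvStartRun expr 0
      simp only [Nat.cast_zero] at hS0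
      have hh : (pvRIdx expr 0).head? = some ((pvRIdx (expr.take j0) 0).headD j0) := by
        rw [hRfull]
        cases pvRIdx (expr.take j0) 0 <;> simp [List.headD]
      have hS : pvFindStart (pvDelta expr) 0
          = some (Int.ofNat ((pvRIdx (expr.take j0) 0).headD j0)) := by
        rw [hS0, hh]; rfl
      have hBval : get_inner_expr_idx_alt expr
          = some (Int.ofNat ((pvRIdx (expr.take j0) 0).headD j0), (j0 : Int)) := by
        unfold get_inner_expr_idx_alt
        rw [hE, hS]
      -- A's output via pvARun
      have hA := pvARun expr j0 htr hj0 hfirst expr 0 rfl (by omega)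
      simp only [List.take_zero, List.count_nil, Nat.cast_zero] at hA
      -- A's end index is an element of the bracket list strictly before j0
      have hdropj : expr.drop j0 = ")" :: expr.drop (j0+1) := by
        rw [List.drop_eq_getElem_cons hj0, hxj]
      have hsplit : pvBIdx expr 0 =
          pvBIdx (expr.take j0) 0 ++ ((j0 : Int) :: pvBIdx (expr.drop (j0+1)) (j0+1)) := by
        conv_lhs => rw [← List.take_append_drop j0 expr]
        rw [pvBIdx_append, hdropj, pvBIdx, if_pos (by decide)]
        rw [hlt]
        simp
      have hcOj : (expr.take (j0+1)).count "(" = (expr.take j0).count "(" := by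
        rw [htakej]; simp [List.count_append]
      have hcCj : (expr.take (j0+1)).count ")" = (expr.take j0).count ")" + 1 := by
        rw [htakej]; simp
      have hQlen : (expr.take j0).count "(" + (expr.take j0).count ")" + 1
          ≤ (pvBIdx (expr.take j0) 0).length :=
        pvBIdx_len_ge1 (expr.take j0) expr[i] hymem hyfake 0
      set R : Nat := (expr.take (j0+1)).count "(" + (expr.take (j0+1)).count ")" with hR
      have hR1 : 1 ≤ R := by omega
      have hRQ : R - 1 < (pvBIdx (expr.take j0) 0).length := by omega
      have hidx : ((expr.take (j0+1)).count "(" : Int) + ((expr.take (j0+1)).count ")" : Int) - 1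
          = ((R - 1 : Nat) : Int) := by omega
      have hendA : PySem.List.pyGetD (pvBIdx expr 0)
          (((expr.take (j0+1)).count "(" : Int) + ((expr.take (j0+1)).count ")" : Int) - 1) 0
          < (j0 : Int) := by
        rw [hidx, PySem.List.pyGetD_natCast, hsplit, List.getD_eq_getElem?_getD,
            List.getElem?_append_left hRQ, List.getElem?_eq_getElem hRQ]
        have hmem := List.getElem_mem hRQ
        have := pvBIdx_mem_lt (expr.take j0) 0 _ hmem
        rw [hlt] at this
        simpa using this
      unfold get_inner_expr_idx
      rw [pvBIdx_eq_bracket_idxs, hA, hBval]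
      intro hc
      rw [Option.some.injEq, Prod.mk.injEq] at hc
      omega
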